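-- pv_equiv track=rewrite | github.com/ATalaei/miniwireshark-mininmap | chechsum3.py | header_checksum
-- ===== SOURCE A (Python) =====
-- def header_checksum(header, size):
--     cksum = 0
--     pointer = 0
--
--     # The main loop adds up each set of 2 bytes. They are first converted to strings and then concatenated
--     # together, converted to integers, and then added to the sum.
--     while size > 1:
--         cksum += int((str("%02x" % (header[pointer],)) +
--                       str("%02x" % (header[pointer + 1],))), 16)
--         size -= 2
--         pointer += 2
--     if size:  # This accounts for a situation where the header is odd
--         cksum += header[pointer]
--
--     cksum = (cksum >> 16) + (cksum & 0xffff)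
--     cksum += (cksum >> 16)
--
--     return (~cksum) & 0xFFFF
-- ===== SOURCE B (Python) =====
-- def header_checksum(header, size):
--     # Same checksum, computed without any hex-string formatting/parsing:
--     # sum even (high-order) and odd (low-order) positions separately.
--     even_end = size - (size % 2)
--     cksum = (sum(header[i] for i in range(0, even_end, 2)) << 8) \
--         + sum(header[i] for i in range(1, even_end, 2))
--     if size % 2:
--         cksum += header[even_end]
--     cksum = (cksum >> 16) + (cksum & 0xffff)
--     cksum += (cksum >> 16)
--     return (~cksum) & 0xFFFF
-- ===== Notes on version B (the rewrite author's own statement) =====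
-- stated objective: faster
-- what changed: A formats each adjacent byte pair as two hex strings, concatenates and reparses them with int(...,16) inside a while loop; B never touches strings: it sums the even-index (high-order) and odd-index (low-order) positions with two strided range sums and combines them as (S_high << 8) + S_low, keeping A's final fold/complement lines.
-- outside the precondition, e.g. on header_checksum([1, 300], 2): A returns 61139, B returns 64979; on header_checksum([-1, 2], 2): A returns 258, B returns 254; on header_checksum([5], -1): A returns 65530, B raises IndexError
import Mathlib
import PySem

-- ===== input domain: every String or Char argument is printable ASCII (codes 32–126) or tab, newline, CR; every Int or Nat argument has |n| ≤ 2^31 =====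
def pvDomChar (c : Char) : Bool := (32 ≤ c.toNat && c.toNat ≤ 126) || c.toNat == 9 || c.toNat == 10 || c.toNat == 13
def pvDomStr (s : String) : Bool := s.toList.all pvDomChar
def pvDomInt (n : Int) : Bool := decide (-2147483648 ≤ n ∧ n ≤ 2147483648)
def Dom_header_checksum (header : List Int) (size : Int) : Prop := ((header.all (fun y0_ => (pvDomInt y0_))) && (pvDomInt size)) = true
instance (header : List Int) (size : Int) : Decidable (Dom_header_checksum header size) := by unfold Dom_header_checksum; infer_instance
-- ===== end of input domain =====

-- B replaces A's per-pair hex-format-then-reparse trick by two strided index sums (high and low bytes); same value, no string work.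

-- ===== PORT A =====
-- hand port of Python's '"%02x" % n' (PySem has no %-formatting): lowercase hex of |n|,
-- zero-padded to total width 2 (the sign counts towards the width); exact for every int n.
def pvHexChar (k : Nat) : Char :=
  ['0','1','2','3','4','5','6','7','8','9','a','b','c','d','e','f'].getD k '0'

def pvHexDigits (n : Nat) : List Char :=
  if _h : n < 16 then [pvHexChar n]
  else pvHexDigits (n / 16) ++ [pvHexChar (n % 16)]
decreasing_by exact Nat.div_lt_self (by omega) (by omega)

def pvFmt02x (n : Int) : List Char :=
  if n < 0 then '-' :: pvHexDigits (-n).toNat           -- '-' plus ≥1 digit is already width ≥ 2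
  else if (pvHexDigits n.toNat).length < 2 then '0' :: pvHexDigits n.toNat
  else pvHexDigits n.toNat

-- hand port of int(s, 16) (proofs about PySem.Int.ofCharsBase? are blocked by its private helpers):
-- optional leading '-', then hex digits folded left; none = ValueError. Exact for the strings this
-- program builds ('-'?, then ≥1 lowercase hex digit, no whitespace/'+'/underscores/'0x' prefix).
def pvHexVal? (c : Char) : Option Nat :=
  match c with
  | '0' => some 0 | '1' => some 1 | '2' => some 2 | '3' => some 3
  | '4' => some 4 | '5' => some 5 | '6' => some 6 | '7' => some 7
  | '8' => some 8 | '9' => some 9 | 'a' => some 10 | 'b' => some 11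
  | 'c' => some 12 | 'd' => some 13 | 'e' => some 14 | 'f' => some 15
  | _ => none

def pvHexFold : List Char → Nat → Option Nat
  | [], acc => some acc
  | c :: r, acc => (pvHexVal? c).bind (fun v => pvHexFold r (acc * 16 + v))

def pvParseHex? (cs : List Char) : Option Int :=
  if cs.head? = some '-' then
    if cs.tail = [] then none else (pvHexFold cs.tail 0).map (fun v => -(v : Int))
  else if cs = [] then none else (pvHexFold cs 0).map (fun v => (v : Int))

-- the while loop of A: returns (cksum, size, pointer) as left by the loop.
-- header[pointer] is pyGetD …, exact under Pre_ (IndexError excluded); the int(…,16)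
-- ValueError (some byte outside 0..255) is likewise excluded by Pre_.
def hcLoop (header : List Int) (cksum size pointer : Int) : Int × Int × Int :=
  if 1 < size then
    hcLoop header
      (cksum + (pvParseHex? (pvFmt02x (PySem.List.pyGetD header pointer 0) ++
                             pvFmt02x (PySem.List.pyGetD header (pointer + 1) 0))).getD 0)
      (size - 2) (pointer + 2)
  else (cksum, size, pointer)
termination_by size.toNat
decreasing_by omega

-- the odd-size trailing byte, from the loop's final (cksum, size, pointer)
def hcTrailA (header : List Int) (r : Int × Int × Int) : Int :=
  if r.2.1 ≠ 0 then r.1 + PySem.List.pyGetD header r.2.2 0 else r.1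

-- A's last three lines (fold twice, complement, mask)
def hcFinishA (cksum1 : Int) : Int :=
  let cksum2 := (cksum1 >>> 16) + PySem.Int.band cksum1 0xffff
  let cksum3 := cksum2 + (cksum2 >>> 16)
  PySem.Int.band (Int.not cksum3) 0xFFFF

def header_checksum (header : List Int) (size : Int) : Int :=
  hcFinishA (hcTrailA header (hcLoop header 0 size 0))

-- ===== PORT B =====
-- (sum over high-order positions << 8) + sum over low-order positions, as in Source B
def hcPairSums (header : List Int) (size : Int) : Int :=
  (((PySem.List.pyRange 0 (size - PySem.Int.mod size 2) 2).map
      (fun i => PySem.List.pyGetD header i 0)).sum <<< (8 : Nat)) +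
   ((PySem.List.pyRange 1 (size - PySem.Int.mod size 2) 2).map
      (fun i => PySem.List.pyGetD header i 0)).sum

-- B's last three lines (identical text in Source B)
def hcFinishB (cksum1 : Int) : Int :=
  let cksum2 := (cksum1 >>> 16) + PySem.Int.band cksum1 0xffff
  let cksum3 := cksum2 + (cksum2 >>> 16)
  PySem.Int.band (Int.not cksum3) 0xFFFF

def header_checksum_alt (header : List Int) (size : Int) : Int :=
  hcFinishB
    (if PySem.Int.mod size 2 ≠ 0 then
        hcPairSums header size + PySem.List.pyGetD header (size - PySem.Int.mod size 2) 0
     else hcPairSums header size)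

-- ===== PRECONDITION & SPEC =====
-- Pre_ keeps the natural domain of an IP-header checksum: a byte count 0 ≤ size ≤ len(header) and
-- bytes 0..255 in the first size cells. Outside it A raises (IndexError past the end, ValueError
-- from int(…,16) on most negative bytes) or returns hex-concatenation artefacts (e.g. a low byte
-- > 255 contributes extra hex digits), which B does not reproduce.
def Pre_header_checksum (header : List Int) (size : Int) : Prop :=
  0 ≤ size ∧ size ≤ header.length ∧ ∀ b ∈ header.take size.toNat, 0 ≤ b ∧ b < 256
instance (header : List Int) (size : Int) : Decidable (Pre_header_checksum header size) := by
  unfold Pre_header_checksum; infer_instance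

def pvWitness_header_checksum : List Int × Int := ([69, 0, 0, 40, 17], 5)

def Spec_header_checksum (header : List Int) (size : Int) (out : Int) : Prop := out = header_checksum_alt header size
instance (header : List Int) (size : Int) (out : Int) : Decidable (Spec_header_checksum header size out) := by unfold Spec_header_checksum; infer_instance

-- ===== CLAIM (what is proved, stated in full; the proofs are below) =====
def Claim_equal_header_checksum : Prop := ∀ (header : List Int) (size : Int), Dom_header_checksum header size → Pre_header_checksum header size → Spec_header_checksum header size (header_checksum header size)

-- ===== LEMMAS AND PROOFS =====

lemma pvHexVal?_pvHexChar {k : Nat} (hk : k < 16) : pvHexVal? (pvHexChar k) = some k := by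
  interval_cases k <;> decide

lemma pvHexChar_ne_dash {k : Nat} (hk : k < 16) : pvHexChar k ≠ '-' := by
  interval_cases k <;> decide

lemma pvHexDigits_lt_256 {n : Nat} (h : n < 256) :
    pvHexDigits n = if n < 16 then [pvHexChar n] else [pvHexChar (n / 16), pvHexChar (n % 16)] := by
  by_cases h16 : n < 16
  · rw [pvHexDigits, dif_pos h16, if_pos h16]
  · rw [pvHexDigits, dif_neg h16, if_neg h16,
        pvHexDigits, dif_pos (show n / 16 < 16 by omega)]
    rfl

lemma pvFmt02x_byte {a : Int} (h0 : 0 ≤ a) (h1 : a < 256) :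
    pvFmt02x a = [pvHexChar (a.toNat / 16), pvHexChar (a.toNat % 16)] := by
  unfold pvFmt02x
  rw [if_neg (by omega), pvHexDigits_lt_256 (by omega)]
  by_cases h16 : a.toNat < 16
  · rw [if_pos h16, Nat.div_eq_of_lt h16, Nat.mod_eq_of_lt h16]
    simp [pvHexChar]
  · rw [if_neg h16]
    simp

lemma pvHexFold_cons {c : Char} {v : Nat} (r : List Char) (acc : Nat)
    (h : pvHexVal? c = some v) : pvHexFold (c :: r) acc = pvHexFold r (acc * 16 + v) := by
  simp [pvHexFold, h]

-- the value A adds per pair: concatenating two 2-digit hex bytes is hi*256 + lo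
lemma pvPair_val {a b : Int} (ha0 : 0 ≤ a) (ha1 : a < 256) (hb0 : 0 ≤ b) (hb1 : b < 256) :
    (pvParseHex? (pvFmt02x a ++ pvFmt02x b)).getD 0 = 256 * a + b := by
  rw [pvFmt02x_byte ha0 ha1, pvFmt02x_byte hb0 hb1]
  have hda : a.toNat / 16 < 16 := by omega
  have hdb : b.toNat / 16 < 16 := by omega
  have hma : a.toNat % 16 < 16 := Nat.mod_lt _ (by omega)
  have hmb : b.toNat % 16 < 16 := Nat.mod_lt _ (by omega)
  simp only [List.cons_append, List.nil_append]
  rw [pvParseHex?]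
  rw [if_neg (by simp only [List.head?_cons, Option.some.injEq]; exact pvHexChar_ne_dash hda),
      if_neg (by simp)]
  rw [pvHexFold_cons _ _ (pvHexVal?_pvHexChar hda),
      pvHexFold_cons _ _ (pvHexVal?_pvHexChar hma),
      pvHexFold_cons _ _ (pvHexVal?_pvHexChar hdb),
      pvHexFold_cons _ _ (pvHexVal?_pvHexChar hmb)]
  have hnil : ∀ N : Nat, ((pvHexFold [] N).map (fun v => (v : Int))).getD 0 = N := fun N => rfl
  rw [hnil]
  have := Nat.div_add_mod a.toNat 16
  have := Nat.div_add_mod b.toNat 16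
  push_cast
  omega

-- what A's while loop produces, as a sum over the pairs it visits
lemma hcLoop_spec (header : List Int) (p : Nat) :
    ∀ (ptr cksum r : Int), 0 ≤ r → r ≤ 1 →
    (∀ i : Int, ptr ≤ i → i < ptr + 2 * p →
        0 ≤ PySem.List.pyGetD header i 0 ∧ PySem.List.pyGetD header i 0 < 256) →
    hcLoop header cksum (2 * p + r) ptr =
      (cksum + ((List.range p).map (fun k : Nat =>
          256 * PySem.List.pyGetD header (ptr + 2 * k) 0 +
          PySem.List.pyGetD header (ptr + 2 * k + 1) 0)).sum,
       r, ptr + 2 * p) := by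
  induction p with
  | zero =>
    intro ptr cksum r hr0 hr1 _
    rw [hcLoop, if_neg (by omega)]
    simp
  | succ p ih =>
    intro ptr cksum r hr0 hr1 hvalid
    rw [hcLoop, if_pos (by push_cast; omega)]
    have h0 := hvalid ptr (le_refl _) (by push_cast; omega)
    have h1 := hvalid (ptr + 1) (by omega) (by push_cast; omega)
    rw [show 2 * ((p + 1 : Nat) : Int) + r - 2 = 2 * p + r by push_cast; ring]
    rw [ih (ptr + 2) _ r hr0 hr1
      (fun i hi1 hi2 => hvalid i (by omega) (by push_cast at hi2 ⊢; omega))]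
    rw [pvPair_val h0.1 h0.2 h1.1 h1.2]
    simp only [Prod.mk.injEq]
    refine ⟨?_, trivial, by push_cast; ring⟩
    rw [List.range_succ_eq_map]
    simp only [List.map_cons, List.sum_cons, List.map_map]
    have hmc : ((List.range p).map (Function.comp (fun k : Nat =>
        256 * PySem.List.pyGetD header (ptr + 2 * ↑k) 0 +
        PySem.List.pyGetD header (ptr + 2 * ↑k + 1) 0) Nat.succ)).sum
        = ((List.range p).map (fun k : Nat =>
        256 * PySem.List.pyGetD header (ptr + 2 + 2 * ↑k) 0 +
        PySem.List.pyGetD header (ptr + 2 + 2 * ↑k + 1) 0)).sum := by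
      apply congrArg
      apply List.map_congr_left
      intro k _
      simp only [Function.comp_def, Nat.succ_eq_add_one, Nat.cast_add, Nat.cast_one]
      rw [show ptr + 2 * ((k : Int) + 1) = ptr + 2 + 2 * (k : Int) from by ring]
    rw [hmc]
    push_cast
    ring
-- a sum of pairwise (256*hi + lo) splits into 256 * (sum hi) + (sum lo)
lemma pv_sum_split (f g : Nat → Int) (p : Nat) :
    ((List.range p).map (fun k => 256 * f k + g k)).sum =
      256 * ((List.range p).map f).sum + ((List.range p).map g).sum := by
  induction p with
  | zero => simp
  | succ p ih => simp [List.range_succ, ih]; ring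

lemma pv_pyRange_stride2 (a e : Int) :
    PySem.List.pyRange a e 2 = (List.range (if a < e then ((e - a + 2 - 1) / 2).toNat else 0)).map
      (fun k : Nat => a + 2 * k) := by
  rw [PySem.List.pyRange_of_pos a e (by omega)]

theorem pv_main (header : List Int) (size : Int) (hpre : Pre_header_checksum header size) :
    header_checksum header size = header_checksum_alt header size := by
  obtain ⟨hs0, hslen, hbytes⟩ := hpre
  -- decompose size = 2*p + r
  have hr0 : 0 ≤ PySem.Int.mod size 2 := PySem.Int.mod_nonneg size (by omega)
  have hr2 : PySem.Int.mod size 2 < 2 := PySem.Int.mod_lt size (by omega)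
  have hdm := PySem.Int.floordiv_mul_add_mod size 2
  have hfd0 : 0 ≤ PySem.Int.floordiv size 2 := by omega
  set r : Int := PySem.Int.mod size 2 with hr
  set p : Nat := (PySem.Int.floordiv size 2).toNat with hp
  have hpd : (p : Int) = PySem.Int.floordiv size 2 := by omega
  have hsize : size = 2 * p + r := by omega
  -- every index the loop touches holds a byte
  have hvalid : ∀ i : Int, 0 ≤ i → i < size →
      0 ≤ PySem.List.pyGetD header i 0 ∧ PySem.List.pyGetD header i 0 < 256 := by
    intro i h0 h1
    have hilen : i.toNat < header.length := by omega
    have hg : PySem.List.pyGetD header i 0 = header.getD i.toNat 0 := by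
      conv_lhs => rw [show i = ((i.toNat : Nat) : Int) by omega]
      rw [PySem.List.pyGetD_natCast]
    rw [hg, List.getD_eq_getElem?_getD, List.getElem?_eq_getElem hilen, Option.getD_some]
    have hmem : header[i.toNat] ∈ header.take size.toNat := by
      have ht : (header.take size.toNat)[i.toNat]'(by simp [List.length_take]; omega)
          = header[i.toNat] := List.getElem_take
      rw [← ht]
      exact List.getElem_mem _
    exact hbytes _ hmem
  -- evaluate A's loop
  have hloop := hcLoop_spec header p 0 0 r hr0 (by omega)
    (fun i hi1 hi2 => hvalid i hi1 (by omega))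
  rw [show (2 * (p : Int) + r) = size from hsize.symm] at hloop
  -- evaluate B's two ranges
  have heven : size - r = 2 * p := by omega
  have hhigh : PySem.List.pyRange 0 (size - r) 2
      = (List.range p).map (fun k : Nat => (0 : Int) + 2 * k) := by
    rw [heven, pv_pyRange_stride2 0 (2 * p)]
    by_cases hp0 : 0 < (p : Int)
    · rw [if_pos (by omega)]
      congr 2
      omega
    · rw [if_neg (by omega)]
      congr 2
      omega
  have hlow : PySem.List.pyRange 1 (size - r) 2
      = (List.range p).map (fun k : Nat => (1 : Int) + 2 * k) := by
    rw [heven, pv_pyRange_stride2 1 (2 * p)]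
    by_cases hp0 : 0 < (p : Int)
    · rw [if_pos (by omega)]
      congr 2
      omega
    · rw [if_neg (by omega)]
      congr 2
      omega
  -- both sides
  unfold header_checksum header_checksum_alt hcTrailA hcPairSums
  rw [hloop, hhigh, hlow, ← hr]
  simp only [List.map_map]
  have hcksum :
      (0 : Int) + ((List.range p).map (fun k : Nat =>
          256 * PySem.List.pyGetD header ((0 : Int) + 2 * k) 0 +
          PySem.List.pyGetD header ((0 : Int) + 2 * k + 1) 0)).sum =
      (((List.range p).map ((fun i => PySem.List.pyGetD header i 0) ∘ fun k : Nat => (0 : Int) + 2 * k)).sum <<< (8 : Nat)) +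
        ((List.range p).map ((fun i => PySem.List.pyGetD header i 0) ∘ fun k : Nat => (1 : Int) + 2 * k)).sum := by
    rw [Int.shiftLeft_eq]
    simp only [Function.comp_def]
    rw [zero_add, pv_sum_split
      (fun k : Nat => PySem.List.pyGetD header ((0 : Int) + 2 * k) 0)
      (fun k : Nat => PySem.List.pyGetD header ((0 : Int) + 2 * k + 1) 0)]
    have hsh : ((List.range p).map (fun k : Nat => PySem.List.pyGetD header ((1 : Int) + 2 * k) 0)).sum =
        ((List.range p).map (fun k : Nat => PySem.List.pyGetD header ((0 : Int) + 2 * k + 1) 0)).sum := by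
      apply congrArg
      apply List.map_congr_left
      intro k _
      rw [show (1 : Int) + 2 * k = (0 : Int) + 2 * k + 1 by ring]
    rw [hsh, show ((2 : Int) ^ 8) = 256 from by norm_num]
    ring
  have hfin : ∀ c : Int, hcFinishA c = hcFinishB c := fun _ => rfl
  rw [hcksum, hfin]
  have hptr : (0 : Int) + 2 * p = size - r := by omega
  rw [hptr]

-- ===== VERDICT (by name: the statement is the Claim_ definition above) =====
theorem header_checksum_spec : Claim_equal_header_checksum := by
  intro header size _ hpre
  unfold Spec_header_checksum
  exact pv_main header size hpre
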